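-- pv_equiv track=rewrite | github.com/irintai-iatniri/srt_library | phase_state_benchmarks.py | decode_16sym
-- ===== SOURCE A (Python) =====
-- def decode_16sym(values, vocab="ABCDEFGHIJKLMNOP"):
--     """Decode 4-node groups back to 16-symbol alphabet."""
--     result = []
--     for i in range(0, len(values) - 3, 4):
--         bits = [(1 if values[i + k] >= 0 else 0) for k in range(4)]
--         idx = (bits[0] << 3) | (bits[1] << 2) | (bits[2] << 1) | bits[3]
--         if idx < len(vocab):
--             result.append(vocab[idx])
--         else:
--             result.append('?')
--     return "".join(result)
-- ===== SOURCE B (Python) =====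
-- def decode_16sym(values, vocab="ABCDEFGHIJKLMNOP"):
--     """Decode 4-node groups back to 16-symbol alphabet.
--
--     Single pass with a Horner accumulator: no indexing, no slicing.
--     """
--     out = []
--     idx = 0
--     n = 0
--     for v in values:
--         idx = idx * 2 + (1 if v >= 0 else 0)
--         n += 1
--         if n == 4:
--             out.append(vocab[idx] if idx < len(vocab) else '?')
--             idx = 0
--             n = 0
--     return ''.join(out)
-- ===== Notes on version B (the rewrite author's own statement) =====
-- stated objective: faster
-- what changed: Replaces the index-range loop (per-group indexed comprehension plus shift/or decoding) by a single streaming pass over the values with a Horner accumulator and a group counter, eliminating all indexing and the inner range(4) pass.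
import Mathlib
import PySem

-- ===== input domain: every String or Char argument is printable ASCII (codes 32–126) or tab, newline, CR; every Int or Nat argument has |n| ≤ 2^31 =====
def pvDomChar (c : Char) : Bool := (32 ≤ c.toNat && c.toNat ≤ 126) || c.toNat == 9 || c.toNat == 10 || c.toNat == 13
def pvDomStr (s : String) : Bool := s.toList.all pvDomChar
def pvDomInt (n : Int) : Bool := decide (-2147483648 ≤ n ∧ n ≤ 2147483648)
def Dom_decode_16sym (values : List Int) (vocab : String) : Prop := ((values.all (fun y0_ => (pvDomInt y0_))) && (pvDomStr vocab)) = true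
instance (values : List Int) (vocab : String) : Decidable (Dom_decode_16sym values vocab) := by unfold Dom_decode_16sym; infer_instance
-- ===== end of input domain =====

-- B replaces A's index-range loop (per-group indexed comprehension + bit shifts) by a single
-- streaming pass with a Horner accumulator and group counter; objective: faster by a constant factor (no per-element indexing, no inner pass; measured).

-- ===== PORT A =====
-- literal port of A: loop over range(0, len(values)-3, 4); the .getD defaults are
-- unreachable (every index used is in range, and 0 ≤ idx < len(vocab) on the hit branch)
def decode_16sym (values : List Int) (vocab : String) : String :=
  let result : List Char :=
    (PySem.List.pyRange 0 ((values.length : Int) - 3) 4).foldl (fun acc i =>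
      let bits : List Nat := (PySem.List.pyRange 0 4 1).map
        (fun k => if 0 ≤ (PySem.List.pyGet? values (i + k)).getD 0 then 1 else 0)
      let idx : Nat := (PySem.List.pyGetD bits 0 0) <<< 3 ||| (PySem.List.pyGetD bits 1 0) <<< 2 |||
                       (PySem.List.pyGetD bits 2 0) <<< 1 ||| PySem.List.pyGetD bits 3 0
      if (idx : Int) < PySem.Str.len vocab then
        acc ++ [(PySem.Str.pyGet? vocab (idx : Int)).getD '?']
      else acc ++ ['?']) []
  String.ofList result

-- ===== PORT B =====
-- literal port of B: one foldl over values with state (out, idx, n)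
def decode_16sym_alt (values : List Int) (vocab : String) : String :=
  let st : List Char × Int × Int :=
    values.foldl (fun s v =>
      let idx := s.2.1 * 2 + (if 0 ≤ v then 1 else 0)
      let n := s.2.2 + 1
      if n == 4 then
        (s.1 ++ [if idx < PySem.Str.len vocab then (PySem.Str.pyGet? vocab idx).getD '?' else '?'], 0, 0)
      else (s.1, idx, n)) ([], 0, 0)
  String.ofList st.1

-- ===== PRECONDITION & SPEC =====
def Spec_decode_16sym (values : List Int) (vocab : String) (out : String) : Prop := out = decode_16sym_alt values vocab
instance (values : List Int) (vocab : String) (out : String) : Decidable (Spec_decode_16sym values vocab out) := by unfold Spec_decode_16sym; infer_instance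

-- ===== CLAIM (what is proved, stated in full; the proofs are below) =====
def Claim_equal_decode_16sym : Prop := ∀ (values : List Int) (vocab : String), Dom_decode_16sym values vocab → Spec_decode_16sym values vocab (decode_16sym values vocab)

-- ===== LEMMAS AND PROOFS =====
-- common per-group symbol
def pvSym (vocab : String) (idx : Int) : Char :=
  if idx < PySem.Str.len vocab then (PySem.Str.pyGet? vocab idx).getD '?' else '?'

def pvIdx (a b c d : Int) : Int :=
  (if 0 ≤ a then 8 else 0) + (if 0 ≤ b then 4 else 0) + (if 0 ≤ c then 2 else 0) + (if 0 ≤ d then 1 else 0)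

def pvChunks (vocab : String) : List Int → List Char
  | a :: b :: c :: d :: r => pvSym vocab (pvIdx a b c d) :: pvChunks vocab r
  | _ => []

lemma rng (n : Nat) :
    PySem.List.pyRange 0 ((n : Int) - 3) 4 = (List.range (n/4)).map (fun k : Nat => 4 * (k:Int)) := by
  rw [PySem.List.pyRange_of_pos _ _ (by norm_num)]
  have h : (if (0:Int) < (n:Int) - 3 then (((n:Int) - 3 - 0 + 4 - 1)/4).toNat else 0) = n/4 := by
    split_ifs with h0
    · have : ((n:Int) - 3 - 0 + 4 - 1) = (n:Int) := by ring
      rw [this]; omega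
    · omega
  rw [h]; simp

lemma idxeq (p q r s : Prop) [Decidable p] [Decidable q] [Decidable r] [Decidable s] :
    (((if p then (1:Nat) else 0) <<< 3 ||| (if q then (1:Nat) else 0) <<< 2 |||
      (if r then (1:Nat) else 0) <<< 1 ||| (if s then (1:Nat) else 0) : Nat) : Int) =
    (if p then (8:Int) else 0) + (if q then 4 else 0) + (if r then 2 else 0) + (if s then 1 else 0) := by
  split_ifs <;> decide

-- A's per-group body
def fA (values : List Int) (vocab : String) (i : Int) : Char :=
  let bits : List Nat := (PySem.List.pyRange 0 4 1).map
    (fun k => if 0 ≤ (PySem.List.pyGet? values (i + k)).getD 0 then 1 else 0)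
  let idx : Nat := (PySem.List.pyGetD bits 0 0) <<< 3 ||| (PySem.List.pyGetD bits 1 0) <<< 2 |||
                   (PySem.List.pyGetD bits 2 0) <<< 1 ||| PySem.List.pyGetD bits 3 0
  if (idx : Int) < PySem.Str.len vocab then (PySem.Str.pyGet? vocab (idx : Int)).getD '?' else '?'

lemma bits_eval (values : List Int) (vocab : String) (i : Int) :
    fA values vocab i =
      pvSym vocab (pvIdx ((PySem.List.pyGet? values (i+0)).getD 0) ((PySem.List.pyGet? values (i+1)).getD 0)
        ((PySem.List.pyGet? values (i+2)).getD 0) ((PySem.List.pyGet? values (i+3)).getD 0)) := by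
  have hr : PySem.List.pyRange 0 4 1 = [0,1,2,3] := by decide
  unfold fA pvSym pvIdx
  rw [hr]
  simp only [List.map_cons, List.map_nil, PySem.List.pyGetD_ofNat']
  rw [show ∀ x0 x1 x2 x3 : Nat,
      ([x0,x1,x2,x3].getD 0 0 <<< 3 ||| [x0,x1,x2,x3].getD 1 0 <<< 2 |||
       [x0,x1,x2,x3].getD 2 0 <<< 1 ||| [x0,x1,x2,x3].getD 3 0)
      = (x0 <<< 3 ||| x1 <<< 2 ||| x2 <<< 1 ||| x3) from fun _ _ _ _ => rfl]
  rw [idxeq]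

-- peel one chunk off values: indices shift by 4
lemma pyGet?_shift4 (a b c d : Int) (r : List Int) (i : Int) (hi : 0 ≤ i) :
    PySem.List.pyGet? (a :: b :: c :: d :: r) (i + 4) = PySem.List.pyGet? r i := by
  obtain ⟨n, rfl⟩ := Int.eq_ofNat_of_zero_le hi
  have h1 : ((n:Int) + 4) = ((n+3 : Nat) : Int) + 1 := by push_cast; ring
  rw [h1, PySem.List.pyGet?_cons_succ]
  have h2 : ((n+3 : Nat) : Int) = ((n+2 : Nat) : Int) + 1 := by push_cast; ring
  rw [h2, PySem.List.pyGet?_cons_succ]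
  have h3 : ((n+2 : Nat) : Int) = ((n+1 : Nat) : Int) + 1 := by push_cast; ring
  rw [h3, PySem.List.pyGet?_cons_succ]
  have h4 : ((n+1 : Nat) : Int) = ((n : Nat) : Int) + 1 := by push_cast; ring
  rw [h4, PySem.List.pyGet?_cons_succ]

lemma fA_shift (vocab : String) (a b c d : Int) (r : List Int) (k : Nat) :
    fA (a :: b :: c :: d :: r) vocab (4*(k:Int)+4) = fA r vocab (4*(k:Int)) := by
  rw [bits_eval, bits_eval]
  have e : ∀ j : Int, (4*(k:Int)+4) + j = (4*(k:Int) + j) + 4 := by intro j; ring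
  rw [e 0, e 1, e 2, e 3,
      pyGet?_shift4 _ _ _ _ _ _ (by positivity),
      pyGet?_shift4 _ _ _ _ _ _ (by positivity),
      pyGet?_shift4 _ _ _ _ _ _ (by positivity),
      pyGet?_shift4 _ _ _ _ _ _ (by positivity)]

lemma fA_head (vocab : String) (a b c d : Int) (r : List Int) :
    fA (a :: b :: c :: d :: r) vocab 0 = pvSym vocab (pvIdx a b c d) := by
  rw [bits_eval]
  have h3 : (0:Int) ≤ ↑r.length + 1 + 1 + 1 := by positivity
  have h2 : (0:Int) ≤ ↑r.length + 1 + 1 := by positivity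
  have hc2 : (2:Int) ≤ ↑r.length + 1 + 1 + 1 := by omega
  have hc3 : (3:Int) ≤ ↑r.length + 1 + 1 + 1 := by omega
  norm_num [PySem.List.pyGet?, PySem.List.pyIdx?, h3, h2, hc2, hc3]
  rfl

lemma mapA (vocab : String) (values : List Int) :
    (PySem.List.pyRange 0 ((values.length : Int) - 3) 4).map (fA values vocab) = pvChunks vocab values := by
  induction values using pvChunks.induct with
  | case1 a b c d r ih =>
    rw [rng, show (a::b::c::d::r).length / 4 = r.length/4 + 1 from by simp; omega,
        List.range_succ_eq_map, List.map_cons, List.map_cons, List.map_map, List.map_map]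
    rw [rng] at ih
    show fA (a::b::c::d::r) vocab (4*((0:Nat):Int)) :: _ = _
    rw [show (4*((0:Nat):Int)) = 0 from by norm_num, fA_head]
    unfold pvChunks
    congr 1
    rw [← ih, List.map_map]
    apply List.map_congr_left
    intro k _
    show fA (a::b::c::d::r) vocab (4*((k+1 : Nat):Int)) = fA r vocab (4*(k:Int))
    rw [show (4*((k+1 : Nat):Int)) = 4*(k:Int)+4 from by push_cast; ring, fA_shift]
  | case2 vs h =>
    have hlen : vs.length < 4 := by
      rcases vs with _ | ⟨a, _ | ⟨b, _ | ⟨c, _ | ⟨d, r⟩⟩⟩⟩ <;> simp_all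
      exact (h a b c d r rfl rfl rfl rfl rfl).elim
    rw [rng, show vs.length / 4 = 0 from by omega]
    rcases vs with _ | ⟨a, _ | ⟨b, _ | ⟨c, _ | ⟨d, r⟩⟩⟩⟩ <;>
      first | (exact (h _ _ _ _ _ rfl).elim) | (simp [pvChunks])

lemma A_eq (values : List Int) (vocab : String) :
    decode_16sym values vocab =
      String.ofList ((PySem.List.pyRange 0 ((values.length : Int) - 3) 4).map (fA values vocab)) := by
  unfold decode_16sym
  have hb : (fun (acc : List Char) (i : Int) =>
      let bits : List Nat := (PySem.List.pyRange 0 4 1).map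
        (fun k => if 0 ≤ (PySem.List.pyGet? values (i + k)).getD 0 then 1 else 0)
      let idx : Nat := (PySem.List.pyGetD bits 0 0) <<< 3 ||| (PySem.List.pyGetD bits 1 0) <<< 2 |||
                       (PySem.List.pyGetD bits 2 0) <<< 1 ||| PySem.List.pyGetD bits 3 0
      if (idx : Int) < PySem.Str.len vocab then
        acc ++ [(PySem.Str.pyGet? vocab (idx : Int)).getD '?']
      else acc ++ ['?']) = fun acc i => acc ++ [fA values vocab i] := by
    funext acc i
    simp only [fA]
    split_ifs <;> rfl
  rw [hb, PySem.List.foldl_append_singleton_eq_map]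
  simp

def pvStep (vocab : String) : (List Char × Int × Int) → Int → (List Char × Int × Int) := fun s v =>
  let idx := s.2.1 * 2 + (if 0 ≤ v then 1 else 0)
  let n := s.2.2 + 1
  if n == 4 then
    (s.1 ++ [if idx < PySem.Str.len vocab then (PySem.Str.pyGet? vocab idx).getD '?' else '?'], 0, 0)
  else (s.1, idx, n)

lemma foldB (vocab : String) : ∀ (vs : List Int) (acc : List Char),
    (vs.foldl (pvStep vocab) (acc, 0, 0)).1 = acc ++ pvChunks vocab vs := by
  intro vs
  induction vs using pvChunks.induct with
  | case1 a b c d r ih =>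
    intro acc
    simp only [List.foldl_cons]
    have h4 : pvStep vocab (pvStep vocab (pvStep vocab (pvStep vocab (acc,0,0) a) b) c) d
        = (acc ++ [pvSym vocab (pvIdx a b c d)], 0, 0) := by
      simp only [pvStep]
      norm_num
      have hidx : ((((if 0 ≤ a then (2:Int) else 0) + if 0 ≤ b then 1 else 0) * 2 + if 0 ≤ c then 1 else 0) * 2
          + if 0 ≤ d then 1 else 0) = pvIdx a b c d := by
        unfold pvIdx; split_ifs <;> norm_num
      rw [hidx]
      norm_num [pvSym]
    rw [h4, ih]
    simp [pvChunks]
  | case2 vs h =>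
    intro acc
    rcases vs with _ | ⟨a, _ | ⟨b, _ | ⟨c, _ | ⟨d, r⟩⟩⟩⟩ <;>
      first | (exact (h _ _ _ _ _ rfl).elim) | (simp [pvStep, pvChunks])


-- ===== VERDICT (by name: the statement is the Claim_ definition above) =====
theorem decode_16sym_spec : Claim_equal_decode_16sym := by
  intro values vocab _
  unfold Spec_decode_16sym
  rw [A_eq, mapA]
  have hB : decode_16sym_alt values vocab = String.ofList ((values.foldl (pvStep vocab) ([], 0, 0)).1) := rfl
  rw [hB, foldB]
  simp
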